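-- pv_equiv track=rewrite | github.com/brianhuynh2021/python_leetcode | coding_challenge/Python/77_next_letter_optimzed.py | get_prev_smaller
-- ===== SOURCE A (Python) =====
-- def get_prev_smaller(n: int) -> int:
--     temp = n
--     c0 = 0  # count of trailing 1s
--     c1 = 0  # count of 0s after those 1s
--
--     # Step 1: count trailing 1s
--     while (temp & 1) == 1:
--         c1 += 1
--         temp >>= 1
--
--     # If all 1s, no smaller number is possible
--     if temp == 0:
--         return -1
--
--     # Step 2: count 0s after trailing 1s
--     while ((temp & 1) == 0) and temp != 0:
--         c0 += 1
--         temp >>= 1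
--
--     p = c0 + c1  # position of rightmost non-trailing 1
--
--     # Step 3: clear from bit p onwards
--     n &= (~0) << (p + 1)
--
--     # Step 4: insert (c1 + 1) ones just left-aligned to the right
--     mask = (1 << (c1 + 1)) - 1
--     n |= mask << (c0 - 1)
--
--     return n
-- ===== SOURCE B (Python) =====
-- def get_prev_smaller(n: int) -> int:
--     strip = n & (n + 1)              # n with its trailing ones cleared
--     if strip == 0:
--         return -1                    # n is 0 or all ones: no smaller number with same popcount
--     b1 = (n + 1) & -(n + 1)          # 2**c1, c1 = number of trailing ones of n
--     bp = strip & -strip              # 2**p,  p = position of rightmost non-trailing 1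
--     hi = n - bp - (b1 - 1)           # clear bits p..0 of n
--     return hi + (2 * b1 - 1) * (bp // (2 * b1))   # repack (c1+1) ones at bit c0-1
-- ===== Notes on version B (the rewrite author's own statement) =====
-- stated objective: alternative
-- what changed: B replaces A's two counting while-loops and mask reconstruction by a loop-free lowest-set-bit arithmetic (Gosper-style): strip trailing ones with n&(n+1), isolate 2^c1 and 2^p with x&-x, and rebuild the result with subtraction, one division and one addition.
-- outside the precondition, e.g. on get_prev_smaller(-1): A does not finish within the time limit, B returns -1
import Mathlib
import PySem

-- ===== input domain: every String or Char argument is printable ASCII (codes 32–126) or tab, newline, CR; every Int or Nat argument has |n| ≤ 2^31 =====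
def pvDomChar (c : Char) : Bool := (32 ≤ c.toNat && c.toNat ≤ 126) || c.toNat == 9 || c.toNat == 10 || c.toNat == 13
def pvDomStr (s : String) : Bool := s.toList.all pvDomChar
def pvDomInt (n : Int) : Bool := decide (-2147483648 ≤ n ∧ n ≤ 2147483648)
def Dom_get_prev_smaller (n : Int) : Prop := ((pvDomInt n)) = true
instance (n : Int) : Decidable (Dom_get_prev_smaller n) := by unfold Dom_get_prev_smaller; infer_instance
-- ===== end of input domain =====

-- B replaces A's two counting while-loops and mask reconstruction by loop-free
-- lowest-set-bit arithmetic (Gosper-style); same return value on every admitted input.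

-- ===== PORT A =====
-- Step-1 loop of A: `while (temp & 1) == 1: c1 += 1; temp >>= 1`.
-- `temp & 1` is Int.land temp 1; `temp >>= 1` is floor division by 2 (exact: Python `>>` floors).
-- The fuel only makes the loop total; 64 steps are more than any trailing-ones run of an
-- admitted input (|n| ≤ 2^31) on which the Python loop terminates.
def pvLoopA1 : Nat → Int → Int → Int × Int
  | 0, temp, c1 => (temp, c1)
  | fuel+1, temp, c1 =>
      if Int.land temp 1 = 1 then pvLoopA1 fuel (PySem.Int.floordiv temp 2) (c1 + 1)
      else (temp, c1)

-- Step-2 loop of A: `while ((temp & 1) == 0) and temp != 0: c0 += 1; temp >>= 1`.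
def pvLoopA2 : Nat → Int → Int → Int × Int
  | 0, temp, c0 => (temp, c0)
  | fuel+1, temp, c0 =>
      if Int.land temp 1 = 0 ∧ temp ≠ 0 then pvLoopA2 fuel (PySem.Int.floordiv temp 2) (c0 + 1)
      else (temp, c0)

def get_prev_smaller (n : Int) : Int :=
  let t1 := pvLoopA1 64 n 0
  if t1.1 = 0 then -1
  else
    let t2 := pvLoopA2 64 t1.1 0
    let c1 := t1.2
    let c0 := t2.2
    let p := c0 + c1
    -- n &= (~0) << (p + 1)
    let n1 := Int.land n (Int.lnot 0 <<< (p + 1))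
    -- mask = (1 << (c1 + 1)) - 1
    let mask := (1 <<< (c1 + 1) : Int) - 1
    -- n |= mask << (c0 - 1)
    Int.lor n1 (mask <<< (c0 - 1))

-- ===== PORT B =====
-- `//` is PySem.Int.floordiv (Python floor division); `&` is Int.land.
def get_prev_smaller_alt (n : Int) : Int :=
  let strip := Int.land n (n + 1)
  if strip = 0 then -1
  else
    let b1 := Int.land (n + 1) (-(n + 1))
    let bp := Int.land strip (-strip)
    let hi := n - bp - (b1 - 1)
    hi + (2 * b1 - 1) * PySem.Int.floordiv bp (2 * b1)

-- ===== PRECONDITION & SPEC =====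
-- Pre_ excludes only n = -1, where A's first while-loop never terminates
-- (temp stays -1 forever), so A returns no value there.
def Pre_get_prev_smaller (n : Int) : Prop := n ≠ -1
instance (n : Int) : Decidable (Pre_get_prev_smaller n) := by unfold Pre_get_prev_smaller; infer_instance
def pvWitness_get_prev_smaller : Int := 6

def Spec_get_prev_smaller (n : Int) (out : Int) : Prop := out = get_prev_smaller_alt n
instance (n : Int) (out : Int) : Decidable (Spec_get_prev_smaller n out) := by unfold Spec_get_prev_smaller; infer_instance

-- ===== CLAIM (what is proved, stated in full; the proofs are below) =====
def Claim_equal_get_prev_smaller : Prop := ∀ (n : Int), Dom_get_prev_smaller n → Pre_get_prev_smaller n → Spec_get_prev_smaller n (get_prev_smaller n)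

-- ===== LEMMAS AND PROOFS =====

-- bit-step laws for Int.land / Int.lor
lemma pv_land_ee (a b : Int) : Int.land (2*a) (2*b) = 2 * Int.land a b := by
  simpa [Int.bit_val] using Int.land_bit false a false b
lemma pv_land_oo (a b : Int) : Int.land (2*a+1) (2*b+1) = 2 * Int.land a b + 1 := by
  simpa [Int.bit_val] using Int.land_bit true a true b
lemma pv_land_oe (a b : Int) : Int.land (2*a+1) (2*b) = 2 * Int.land a b := by
  simpa [Int.bit_val] using Int.land_bit true a false b
lemma pv_land_eo (a b : Int) : Int.land (2*a) (2*b+1) = 2 * Int.land a b := by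
  simpa [Int.bit_val] using Int.land_bit false a true b
lemma pv_lor_ee (a b : Int) : Int.lor (2*a) (2*b) = 2 * Int.lor a b := by
  simpa [Int.bit_val] using Int.lor_bit false a false b
lemma pv_lor_eo (a b : Int) : Int.lor (2*a) (2*b+1) = 2 * Int.lor a b + 1 := by
  simpa [Int.bit_val] using Int.lor_bit false a true b

lemma pv_nat_ldiff_zero (m : Nat) : Nat.ldiff m 0 = m :=
  Nat.eq_of_testBit_eq (by simp [Nat.testBit_ldiff])
lemma pv_nat_zero_ldiff (m : Nat) : Nat.ldiff 0 m = 0 :=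
  Nat.eq_of_testBit_eq (by simp [Nat.testBit_ldiff])
lemma pv_nat_ldiff_self (m : Nat) : Nat.ldiff m m = 0 :=
  Nat.eq_of_testBit_eq (by simp [Nat.testBit_ldiff])

lemma pv_land_zero (a : Int) : Int.land a 0 = 0 := by
  cases a with
  | ofNat m => show Int.land (Int.ofNat m) (Int.ofNat 0) = 0; simp [Int.land]
  | negSucc m => show Int.land (Int.negSucc m) (Int.ofNat 0) = 0
                 simp [Int.land, pv_nat_zero_ldiff]
lemma pv_lor_zero (a : Int) : Int.lor a 0 = a := by
  cases a with
  | ofNat m => show Int.lor (Int.ofNat m) (Int.ofNat 0) = _; simp [Int.lor]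
  | negSucc m => show Int.lor (Int.negSucc m) (Int.ofNat 0) = _
                 simp [Int.lor, pv_nat_ldiff_zero]
lemma pv_land_neg_one (a : Int) : Int.land a (-1) = a := by
  cases a with
  | ofNat m => show Int.land (Int.ofNat m) (Int.negSucc 0) = _
               simp [Int.land, pv_nat_ldiff_zero]
  | negSucc m => show Int.land (Int.negSucc m) (Int.negSucc 0) = _
                 simp [Int.land]
lemma pv_land_self (a : Int) : Int.land a a = a := by
  cases a with
  | ofNat m => show Int.land (Int.ofNat m) (Int.ofNat m) = _; simp [Int.land]
  | negSucc m => show Int.land (Int.negSucc m) (Int.negSucc m) = _; simp [Int.land]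
lemma pv_land_lnot (u : Int) : Int.land u (-u-1) = 0 := by
  cases u with
  | ofNat m =>
      have h : (-(Int.ofNat m) - 1) = Int.negSucc m := by simp only [Int.negSucc_eq, Int.ofNat_eq_natCast]; ring
      rw [h]; show Int.land (Int.ofNat m) (Int.negSucc m) = 0
      simp [Int.land, pv_nat_ldiff_self]
  | negSucc m =>
      have h : (-(Int.negSucc m) - 1) = Int.ofNat m := by rw [Int.negSucc_eq]; simp
      rw [h]; show Int.land (Int.negSucc m) (Int.ofNat m) = 0
      simp [Int.land, pv_nat_ldiff_self]

lemma pv_land_one_odd (a : Int) : Int.land (2*a+1) 1 = 1 := by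
  have h := pv_land_oo a 0
  simpa [pv_land_zero] using h
lemma pv_land_one_even (a : Int) : Int.land (2*a) 1 = 0 := by
  have h := pv_land_eo a 0
  simpa [pv_land_zero] using h

lemma pv_fdiv2 (a e : Int) (h0 : 0 ≤ e) (h1 : e < 2) :
    PySem.Int.floordiv (2*a+e) 2 = a := by
  rw [PySem.Int.floordiv_eq_iff_of_pos (by norm_num)]
  omega

lemma pv_pow_mono (j k : Nat) (h : j ≤ k) : (2:Int)^j ≤ 2^k := by
  exact pow_le_pow_right₀ (by norm_num) h

lemma pv_pow_pos (k : Nat) : (0:Int) < 2^k := by positivity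

-- shift-left to multiplication
lemma pv_shl (m : Int) (k : Nat) : m <<< ((k : Nat) : Int) = m * 2^k := by
  have h := Int.shiftLeft_eq_mul_pow m k
  simpa using h

-- loop characterisations
lemma pv_loopA1_spec : ∀ (c1 : Nat) (fuel : Nat), c1 ≤ fuel → ∀ (a acc : Int),
    pvLoopA1 fuel (2*a*2^c1 + (2^c1 - 1)) acc = (2*a, acc + c1) := by
  intro c1
  induction c1 with
  | zero =>
      intro fuel _ a acc
      cases fuel with
      | zero => simp [pvLoopA1]
      | succ f => simp [pvLoopA1, pv_land_one_even]
  | succ c1 ih =>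
      intro fuel hf a acc
      cases fuel with
      | zero => omega
      | succ f =>
          have hform : 2*a*2^(c1+1) + (2^(c1+1) - 1)
              = 2*(2*a*2^c1 + (2^c1 - 1)) + 1 := by ring
          rw [pvLoopA1, hform]
          rw [if_pos (pv_land_one_odd _)]
          rw [pv_fdiv2 _ 1 (by norm_num) (by norm_num)]
          rw [ih f (by omega) a (acc+1)]
          congr 1
          push_cast; ring

lemma pv_loopA2_spec : ∀ (c0 : Nat) (fuel : Nat), c0 ≤ fuel → ∀ (u acc : Int),
    pvLoopA2 fuel ((2*u+1)*2^c0) acc = (2*u+1, acc + c0) := by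
  intro c0
  induction c0 with
  | zero =>
      intro fuel _ u acc
      cases fuel with
      | zero => simp [pvLoopA2]
      | succ f =>
          rw [pvLoopA2]
          have h1 : (2*u+1)*2^0 = 2*u+1 := by ring
          rw [h1, if_neg]
          · simp
          · intro hcon
            have := hcon.1
            rw [pv_land_one_odd u] at this
            omega
  | succ c0 ih =>
      intro fuel hf u acc
      cases fuel with
      | zero => omega
      | succ f =>
          have hform : (2*u+1)*2^(c0+1) = 2*((2*u+1)*2^c0) := by ring
          rw [pvLoopA2, hform]
          rw [if_pos]
          · rw [show PySem.Int.floordiv (2*((2*u+1)*2^c0)) 2 = (2*u+1)*2^c0 from by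
                  have := pv_fdiv2 ((2*u+1)*2^c0) 0 (by norm_num) (by norm_num)
                  simpa using this]
            rw [ih f (by omega) u (acc+1)]
            congr 1
            push_cast; ring
          · constructor
            · exact pv_land_one_even _
            · intro hcon
              have h : (2*u+1) * (2:Int)^c0 = 0 := by linarith
              rcases mul_eq_zero.mp h with h' | h'
              · omega
              · exact absurd h' (ne_of_gt (pv_pow_pos c0))

-- lowest set bit: (t * 2^k) & -(t * 2^k) = 2^k for odd t
lemma pv_lsb : ∀ (k : Nat) (u : Int),
    Int.land ((2*u+1)*2^k) (-((2*u+1)*2^k)) = 2^k := by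
  intro k
  induction k with
  | zero =>
      intro u
      have h1 : (2*u+1)*2^0 = 2*u+1 := by ring
      have h2 : -((2*u+1)*(2:Int)^0) = 2*(-u-1)+1 := by ring
      rw [h1]
      rw [show -((2*u+1) : Int) = 2*(-u-1)+1 by ring]
      rw [pv_land_oo, pv_land_lnot]
      norm_num
  | succ k ih =>
      intro u
      have h1 : (2*u+1)*(2:Int)^(k+1) = 2*((2*u+1)*2^k) := by ring
      have h2 : -(2*((2*u+1)*(2:Int)^k)) = 2*(-((2*u+1)*2^k)) := by ring
      rw [h1, h2, pv_land_ee, ih]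
      ring

-- n & (n+1) strips the trailing ones
lemma pv_strip : ∀ (c1 p : Nat), c1 < p → ∀ (u : Int),
    Int.land ((2*u+1)*2^p + 2^c1 - 1) ((2*u+1)*2^p + 2^c1) = (2*u+1)*2^p := by
  intro c1
  induction c1 with
  | zero =>
      intro p hp u
      obtain ⟨q, rfl⟩ : ∃ q, p = q + 1 := ⟨p - 1, by omega⟩
      have h1 : (2*u+1)*(2:Int)^(q+1) + 2^0 - 1 = 2*((2*u+1)*2^q) := by ring
      have h2 : (2*u+1)*(2:Int)^(q+1) + 2^0 = 2*((2*u+1)*2^q)+1 := by ring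
      rw [h1, h2, pv_land_eo, pv_land_self]
      ring
  | succ c1 ih =>
      intro p hp u
      obtain ⟨q, rfl⟩ : ∃ q, p = q + 1 := ⟨p - 1, by omega⟩
      have h1 : (2*u+1)*(2:Int)^(q+1) + 2^(c1+1) - 1
          = 2*((2*u+1)*2^q + 2^c1 - 1) + 1 := by ring
      have h2 : (2*u+1)*(2:Int)^(q+1) + 2^(c1+1)
          = 2*((2*u+1)*2^q + 2^c1) := by ring
      rw [h1, h2, pv_land_oe, ih q (by omega) u]
      ring

-- all-ones: (2^c - 1) & 2^c = 0
lemma pv_allones : ∀ (c : Nat), Int.land ((2:Int)^c - 1) (2^c) = 0 := by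
  intro c
  induction c with
  | zero => decide
  | succ c ih =>
      have h1 : (2:Int)^(c+1) - 1 = 2*(2^c - 1) + 1 := by ring
      have h2 : (2:Int)^(c+1) = 2*(2^c) := by ring
      rw [h1, h2, pv_land_oe, ih]
      ring

-- clearing low bits: (v*2^k + r) & -(2^k) = v*2^k for 0 ≤ r < 2^k
lemma pv_mask_hi : ∀ (k : Nat) (v r : Int), 0 ≤ r → r < 2^k →
    Int.land (v*2^k + r) (-(2^k)) = v*2^k := by
  intro k
  induction k with
  | zero =>
      intro v r h0 h1
      have hr0 : r = 0 := by norm_num at h1; omega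
      subst hr0
      simpa using pv_land_neg_one v
  | succ k ih =>
      intro v r h0 h1
      have h2 : -((2:Int)^(k+1)) = 2*(-(2^k)) := by ring
      rcases Int.even_or_odd r with ⟨r', hr⟩ | ⟨r', hr⟩
      · have h3 : v*(2:Int)^(k+1) + r = 2*(v*2^k + r') := by rw [hr]; ring
        rw [h3, h2, pv_land_ee, ih v r' (by omega) (by
          have : (2:Int)^(k+1) = 2*2^k := by ring
          omega)]
        ring
      · have h3 : v*(2:Int)^(k+1) + r = 2*(v*2^k + r') + 1 := by rw [hr]; ring
        rw [h3, h2, pv_land_oe, ih v r' (by omega) (by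
          have : (2:Int)^(k+1) = 2*2^k := by ring
          omega)]
        ring

-- disjoint or is addition: (v*2^k) | m = v*2^k + m for 0 ≤ m < 2^k
lemma pv_or_add : ∀ (k : Nat) (v m : Int), 0 ≤ m → m < 2^k →
    Int.lor (v*2^k) m = v*2^k + m := by
  intro k
  induction k with
  | zero =>
      intro v m h0 h1
      have hm0 : m = 0 := by norm_num at h1; omega
      subst hm0
      rw [pv_lor_zero]; ring
  | succ k ih =>
      intro v m h0 h1
      rcases Int.even_or_odd m with ⟨m', hm⟩ | ⟨m', hm⟩
      · have h3 : v*(2:Int)^(k+1) = 2*(v*2^k) := by ring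
        rw [h3, hm, show (m'+m' : Int) = 2*m' by ring, pv_lor_ee,
            ih v m' (by omega) (by
              have : (2:Int)^(k+1) = 2*2^k := by ring
              omega)]
        ring
      · have h3 : v*(2:Int)^(k+1) = 2*(v*2^k) := by ring
        rw [h3, hm, show (2*m'+1 : Int) = 2*m'+1 by ring, pv_lor_eo,
            ih v m' (by omega) (by
              have : (2:Int)^(k+1) = 2*2^k := by ring
              omega)]
        ring

-- floor division of powers of two
lemma pv_fdiv_pow (p j : Nat) (h : j ≤ p) :
    PySem.Int.floordiv ((2:Int)^p) (2^j) = 2^(p-j) := by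
  rw [PySem.Int.floordiv_eq_iff_of_pos (pv_pow_pos j)]
  constructor
  · rw [← pow_add]
    have : p - j + j = p := by omega
    rw [this]
  · have h1 : (2:Int)^(p-j) * 2^j = 2^p := by
      rw [← pow_add]; congr 1; omega
    have h2 : (0:Int) < 2^j := pv_pow_pos j
    nlinarith

-- every integer other than -1 is all-ones (2^c - 1) or (2u+1)·2^p + 2^c1 - 1 with c1 < p
lemma pv_decomp : ∀ (n : Int), n ≠ -1 →
    (∃ c : Nat, n = 2^c - 1) ∨
    (∃ (u : Int) (c1 p : Nat), c1 < p ∧ n = (2*u+1)*2^p + 2^c1 - 1) := by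
  suffices H : ∀ (N : Nat) (n : Int), n.natAbs ≤ N → n ≠ -1 →
      (∃ c : Nat, n = 2^c - 1) ∨
      (∃ (u : Int) (c1 p : Nat), c1 < p ∧ n = (2*u+1)*2^p + 2^c1 - 1) by
    exact fun n h => H n.natAbs n le_rfl h
  intro N
  induction N with
  | zero =>
      intro n hle _
      left
      exact ⟨0, by omega⟩
  | succ N ih =>
      intro n hle hne
      by_cases h0 : n = 0
      · left; exact ⟨0, by omega⟩
      by_cases h1 : n = 1
      · left; exact ⟨1, by omega⟩
      by_cases h2 : n = -2
      · right; exact ⟨-1, 0, 1, by omega, by subst h2; norm_num⟩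
      rcases Int.even_or_odd n with ⟨m, hm⟩ | ⟨m, hm⟩
      · -- n = 2m
        have hm2 : n = 2*m := by omega
        have hmne : m ≠ -1 := by omega
        have hmabs : m.natAbs ≤ N := by omega
        rcases ih m hmabs hmne with ⟨c, hc⟩ | ⟨u, c1, p, hcp, hu⟩
        · -- m = 2^c - 1 with c ≥ 1 (m ≠ 0 since n ≠ 0)
          have hc1 : c ≠ 0 := by
            intro h; rw [h] at hc; simp at hc; omega
          obtain ⟨c', rfl⟩ : ∃ c', c = c' + 1 := ⟨c - 1, by omega⟩
          right
          refine ⟨2^c' - 1, 0, 1, by omega, ?_⟩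
          rw [hm2, hc]
          ring
        · rcases Nat.eq_zero_or_pos c1 with hc10 | hc11
          · subst hc10
            right
            refine ⟨u, 0, p+1, by omega, ?_⟩
            rw [hm2, hu]
            ring
          · obtain ⟨c1', rfl⟩ : ∃ c1', c1 = c1' + 1 := ⟨c1 - 1, by omega⟩
            obtain ⟨q, rfl⟩ : ∃ q, p = q + 1 := ⟨p - 1, by omega⟩
            right
            refine ⟨(2*u+1)*2^q + 2^c1' - 1, 0, 1, by omega, ?_⟩
            rw [hm2, hu]
            ring
      · -- n = 2m + 1
        have hmne : m ≠ -1 := by omega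
        have hmabs : m.natAbs ≤ N := by omega
        rcases ih m hmabs hmne with ⟨c, hc⟩ | ⟨u, c1, p, hcp, hu⟩
        · left
          exact ⟨c+1, by rw [hm, hc]; ring⟩
        · right
          refine ⟨u, c1+1, p+1, by omega, ?_⟩
          rw [hm, hu]
          ring

-- Dom bounds keep p small
lemma pv_c_le (c : Nat) (h : (2:Int)^c - 1 ≤ 2147483648) : c ≤ 32 := by
  by_contra hc
  have : (2:Int)^33 ≤ 2^c := pv_pow_mono 33 c (by omega)
  have h33 : (2:Int)^33 = 8589934592 := by norm_num
  omega

lemma pv_p_le (u : Int) (c1 p : Nat) (hcp : c1 < p)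
    (hlo : -2147483648 ≤ (2*u+1)*2^p + 2^c1 - 1)
    (hhi : (2*u+1)*2^p + 2^c1 - 1 ≤ 2147483648) : p ≤ 32 := by
  by_contra hc
  obtain ⟨q, rfl⟩ : ∃ q, p = q + 1 := ⟨p - 1, by omega⟩
  have hq : 33 ≤ q + 1 := by omega
  have hq32 : (2:Int)^32 ≤ 2^q := pv_pow_mono 32 q (by omega)
  have h32 : (2:Int)^32 = 4294967296 := by norm_num
  have hc1q : (2:Int)^c1 ≤ 2^q := pv_pow_mono c1 q (by omega)
  have hpq : (2:Int)^(q+1) = 2*2^q := by ring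
  rcases le_or_gt 0 u with hu | hu
  · have h1 : (1:Int) ≤ 2*u+1 := by omega
    have h2 : (2:Int)^(q+1) ≤ (2*u+1)*2^(q+1) :=
      le_mul_of_one_le_left (le_of_lt (pv_pow_pos (q+1))) h1
    have h3 : (0:Int) < 2^c1 := pv_pow_pos c1
    omega
  · have h1 : (2*u+1 : Int) ≤ -1 := by omega
    have h2 : (2*u+1)*2^(q+1) ≤ -(2^(q+1)) := by
      have := mul_le_mul_of_nonneg_right h1 (le_of_lt (pv_pow_pos (q+1)))
      simpa using this
    omega

lemma pv_lnot_zero : Int.lnot 0 = -1 := by decide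

-- the two ports agree on an all-ones input 2^c - 1 (c ≤ 32): both return -1
lemma pv_case_allones (c : Nat) (hc : c ≤ 32) :
    get_prev_smaller ((2:Int)^c - 1) = get_prev_smaller_alt ((2:Int)^c - 1) := by
  have hA1 : pvLoopA1 64 ((2:Int)^c - 1) 0 = (0, (c:Int)) := by
    have h := pv_loopA1_spec c 64 (by omega) 0 0
    simpa using h
  have hstrip := pv_allones c
  simp [get_prev_smaller, get_prev_smaller_alt, hA1, hstrip]

-- the two ports agree on a generic input (2u+1)·2^p + 2^c1 - 1 (c1 < p ≤ 32)
lemma pv_case_main (u : Int) (c1 p : Nat) (hcp : c1 < p) (hp32 : p ≤ 32) :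
    get_prev_smaller ((2*u+1)*2^p + 2^c1 - 1) = get_prev_smaller_alt ((2*u+1)*2^p + 2^c1 - 1) := by
  set c0 : Nat := p - c1 with hc0def
  have hc0p : 1 ≤ c0 := by omega
  have hpow0 : (2:Int)^(c0-1) * 2 * 2^c1 = 2^p := by
    rw [show (2:Int)^(c0-1) * 2 = 2^(c0-1+1) from (pow_succ 2 (c0-1)).symm, ← pow_add]
    congr 1; omega
  have hA1 : pvLoopA1 64 ((2*u+1)*(2:Int)^p + 2^c1 - 1) 0 = ((2*u+1)*2^c0, (c1:Int)) := by
    have h := pv_loopA1_spec c1 64 (by omega) ((2*u+1)*2^(c0-1)) 0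
    have harg : 2*((2*u+1)*(2:Int)^(c0-1))*2^c1 + ((2:Int)^c1 - 1)
        = (2*u+1)*2^p + 2^c1 - 1 := by linear_combination (2*u+1) * hpow0
    have hres : 2*((2*u+1)*(2:Int)^(c0-1)) = (2*u+1)*2^c0 := by
      have h2 : (2:Int)^(c0-1) * 2 = 2^c0 := by
        rw [← pow_succ]; congr 1; omega
      linear_combination (2*u+1) * h2
    rw [harg, hres] at h
    simpa using h
  have hne : (2*u+1)*(2:Int)^c0 ≠ 0 := by
    intro h
    rcases mul_eq_zero.mp h with h' | h'
    · omega
    · exact absurd h' (ne_of_gt (pv_pow_pos c0))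
  have hA2 : pvLoopA2 64 ((2*u+1)*(2:Int)^c0) 0 = (2*u+1, (c0:Int)) := by
    simpa using pv_loopA2_spec c0 64 (by omega) u 0
  have hshift1 : Int.lnot 0 <<< ((c0:Int) + (c1:Int) + 1) = -((2:Int)^(p+1)) := by
    rw [show ((c0:Int) + (c1:Int) + 1) = ((p+1 : Nat) : Int) by push_cast; omega]
    rw [pv_lnot_zero, pv_shl]
    ring
  have hland : Int.land ((2*u+1)*(2:Int)^p + 2^c1 - 1) (-((2:Int)^(p+1))) = u * 2^(p+1) := by
    have hr : (2*u+1)*(2:Int)^p + 2^c1 - 1 = u*2^(p+1) + ((2:Int)^p + 2^c1 - 1) := by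
      rw [pow_succ]; ring
    have h1 : (0:Int) ≤ 2^p + 2^c1 - 1 := by
      have := pv_pow_pos p; have := pv_pow_pos c1; omega
    have h2 : (2:Int)^p + 2^c1 - 1 < 2^(p+1) := by
      have ha := pv_pow_mono c1 p (le_of_lt hcp)
      have hb : (2:Int)^(p+1) = 2*2^p := by ring
      omega
    rw [hr]
    exact pv_mask_hi (p+1) u _ h1 h2
  have hmask : (1 <<< ((c1:Int)+1) : Int) - 1 = 2^(c1+1) - 1 := by
    rw [show ((c1:Int)+1) = ((c1+1 : Nat):Int) by push_cast; ring, pv_shl]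
    ring
  have hshift2 : ((2:Int)^(c1+1) - 1) <<< ((c0:Int) - 1) = ((2:Int)^(c1+1)-1) * 2^(c0-1) := by
    rw [show ((c0:Int)-1) = ((c0-1 : Nat):Int) by rw [Nat.cast_sub hc0p]; norm_num, pv_shl]
  have hor : Int.lor (u * (2:Int)^(p+1)) (((2:Int)^(c1+1)-1) * 2^(c0-1))
      = u*2^(p+1) + ((2:Int)^(c1+1)-1)*2^(c0-1) := by
    apply pv_or_add
    · exact mul_nonneg (by have := pv_pow_pos (c1+1); omega) (le_of_lt (pv_pow_pos (c0-1)))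
    · have hxy : (2:Int)^(c1+1) * 2^(c0-1) = 2^p := by
        rw [← pow_add]; congr 1; omega
      have h1 : (0:Int) < 2^(c0-1) := pv_pow_pos (c0-1)
      have h2 : (2:Int)^p < 2^(p+1) := by
        have ha : (2:Int)^(p+1) = 2*2^p := by ring
        have := pv_pow_pos p
        omega
      nlinarith
  have hstrip : Int.land ((2*u+1)*(2:Int)^p + 2^c1 - 1) ((2*u+1)*(2:Int)^p + 2^c1 - 1 + 1)
      = (2*u+1)*2^p := by
    have h := pv_strip c1 p hcp u
    rw [show (2*u+1)*(2:Int)^p + 2^c1 - 1 + 1 = (2*u+1)*2^p + 2^c1 by ring]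
    exact h
  have hstripne : (2*u+1)*(2:Int)^p ≠ 0 := by
    intro h
    rcases mul_eq_zero.mp h with h' | h'
    · omega
    · exact absurd h' (ne_of_gt (pv_pow_pos p))
  have hb1 : Int.land ((2*u+1)*(2:Int)^p + 2^c1 - 1 + 1) (-((2*u+1)*(2:Int)^p + 2^c1 - 1 + 1))
      = (2:Int)^c1 := by
    have harg : (2*u+1)*(2:Int)^p + 2^c1 - 1 + 1 = (2*((2*u+1)*2^(c0-1)) + 1) * 2^c1 := by
      linear_combination (-2*u-1) * hpow0
    rw [harg]
    exact pv_lsb c1 ((2*u+1)*2^(c0-1))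
  have hbp : Int.land ((2*u+1)*(2:Int)^p) (-((2*u+1)*(2:Int)^p)) = (2:Int)^p := pv_lsb p u
  have hfd : PySem.Int.floordiv ((2:Int)^p) (2 * 2^c1) = 2^(c0-1) := by
    rw [show (2:Int) * 2^c1 = 2^(c1+1) from by ring]
    rw [pv_fdiv_pow p (c1+1) (by omega)]
    congr 1
  simp only [get_prev_smaller, get_prev_smaller_alt, hA1, hA2, hstrip]
  rw [if_neg hne, if_neg hstripne]
  rw [hshift1, hland, hmask, hshift2, hor, hb1, hbp, hfd]
  have e1 : (2:Int)^(p+1) = 2*2^p := by ring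
  have e2 : (2:Int)^(c1+1) = 2*2^c1 := by ring
  ring_nf

-- ===== VERDICT (by name: the statement is the Claim_ definition above) =====
theorem get_prev_smaller_spec : Claim_equal_get_prev_smaller := by
  intro n hdom hpre
  unfold Spec_get_prev_smaller
  have hdom' : -2147483648 ≤ n ∧ n ≤ 2147483648 := by
    unfold Dom_get_prev_smaller pvDomInt at hdom
    exact of_decide_eq_true hdom
  obtain ⟨hlo, hhi⟩ := hdom'
  rcases pv_decomp n hpre with ⟨c, rfl⟩ | ⟨u, c1, p, hcp, rfl⟩
  · exact pv_case_allones c (pv_c_le c hhi)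
  · exact pv_case_main u c1 p hcp (pv_p_le u c1 p hcp hlo hhi)
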